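-- pv_equiv track=rewrite | github.com/dtcolligan/health_agent_infra | scripts/check_skill_cli_drift.py | find_invocations
-- ===== SOURCE A (Python) =====
-- from typing import Iterable
--
-- def _iter_code_blocks(text: str) -> Iterable[str]:
--     """Yield each fenced code block body (without the fence lines).
--     We only validate flags inside code blocks — prose mentions can be
--     illustrative and shouldn't trigger drift findings."""
--
--     in_block = False
--     buf: list[str] = []
--     for line in text.split("\n"):
--         if line.strip().startswith("```"):
--             if in_block:
--                 yield "\n".join(buf)
--                 buf = []
--                 in_block = False
--             else:
--                 in_block = True
--             continue
--         if in_block: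
--             buf.append(line)
--
-- def find_invocations(text: str, command_chains: list[str]) -> list[tuple[str, str]]:
--     """Return list of (command_chain, scoped_window) tuples for each
--     ``hai <command>`` invocation found in a fenced code block.
--
--     Within a single code block, an invocation owns every line from
--     itself up to (but not including) the next ``hai <command>``
--     invocation in the same block. This keeps multi-line heredoc-style
--     usages intact while preventing one invocation from swallowing
--     flags from sibling commands listed below it.
--     """
--
--     out: list[tuple[str, str]] = []
--     for block in _iter_code_blocks(text):
--         block_lines = block.split("\n")
--         invocation_starts: list[tuple[int, str]] = []
--         for i, line in enumerate(block_lines):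
--             if "hai " not in line:
--                 continue
--             for chain in command_chains:
--                 if f"hai {chain}" in line:
--                     invocation_starts.append((i, chain))
--                     break
--         if not invocation_starts:
--             continue
--         for j, (start, chain) in enumerate(invocation_starts):
--             end = (
--                 invocation_starts[j + 1][0]
--                 if j + 1 < len(invocation_starts)
--                 else len(block_lines)
--             )
--             window = "\n".join(block_lines[start:end])
--             out.append((chain, window))
--     return out
-- ===== SOURCE B (Python) =====
-- def _iter_code_blocks(text):
--     in_block = False
--     buf = []
--     for line in text.split("\n"):
--         if line.strip().startswith("```"):
--             if in_block:
--                 yield "\n".join(buf)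
--                 buf = []
--                 in_block = False
--             else:
--                 in_block = True
--             continue
--         if in_block:
--             buf.append(line)
--
--
-- def _match_chain(line, command_chains):
--     if "hai " not in line:
--         return None
--     for chain in command_chains:
--         if f"hai {chain}" in line:
--             return chain
--     return None
--
--
-- def find_invocations(text, command_chains):
--     """Single pass per block: maintain the currently open invocation window
--     (chain, buffered lines); flush it when the next invocation starts and
--     once more at block end."""
--     out = []
--     for block in _iter_code_blocks(text):
--         cur = None  # (chain, list of lines) of the open window, or None
--         for line in block.split("\n"):
--             chain = _match_chain(line, command_chains)
--             if chain is not None: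
--                 if cur is not None:
--                     out.append((cur[0], "\n".join(cur[1])))
--                 cur = (chain, [line])
--             elif cur is not None:
--                 cur[1].append(line)
--         if cur is not None:
--             out.append((cur[0], "\n".join(cur[1])))
--     return out
-- ===== Notes on version B (the rewrite author's own statement) =====
-- stated objective: simpler
-- what changed: Per code block, A first builds an index list of invocation start positions and then slices the line list between consecutive indices; B does one pass over the block's lines maintaining the currently open (chain, buffer) window, flushing it at the next invocation and at block end, eliminating the index list and slice arithmetic.
import Mathlib
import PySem

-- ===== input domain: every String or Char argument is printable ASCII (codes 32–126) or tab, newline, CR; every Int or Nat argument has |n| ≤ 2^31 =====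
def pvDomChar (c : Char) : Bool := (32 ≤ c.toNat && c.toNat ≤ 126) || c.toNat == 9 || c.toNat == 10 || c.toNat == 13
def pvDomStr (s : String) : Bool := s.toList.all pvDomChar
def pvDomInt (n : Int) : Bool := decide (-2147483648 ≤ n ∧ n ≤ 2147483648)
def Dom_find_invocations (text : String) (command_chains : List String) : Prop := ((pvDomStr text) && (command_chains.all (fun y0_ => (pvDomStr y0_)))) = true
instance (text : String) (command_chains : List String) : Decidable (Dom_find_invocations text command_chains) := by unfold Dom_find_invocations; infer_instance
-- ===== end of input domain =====

-- B replaces A's two-phase per-block scan (index list of invocation starts, then slice arithmetic)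
-- by a single pass that maintains the currently open invocation window; objective: simpler, same cost.

-- ===== PORT A =====
-- shared helper: s.split("\n") (sep is the nonempty literal "\n", so split? always returns some)
def pySplitNL (s : String) : List String := (PySem.Str.split? s "\n").getD []

-- shared helper: _iter_code_blocks, the generator run to completion (both Pythons contain it verbatim).
-- state = (in_block, buf, blocks yielded so far)
def iterCodeBlocks (text : String) : List String :=
  ((pySplitNL text).foldl
    (fun (st : Bool × List String × List String) line =>
      if PySem.Str.startswith (PySem.Str.strip line) "```" then
        if st.1 then (false, [], st.2.2 ++ [PySem.Str.join "\n" st.2.1])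
        else (true, st.2.1, st.2.2)
      else if st.1 then (st.1, st.2.1 ++ [line], st.2.2) else st)
    (false, [], [])).2.2

-- shared helper: the per-line test both Pythons perform ("hai " guard, then first matching chain)
def matchChain (command_chains : List String) (line : String) : Option String :=
  if PySem.Str.isIn "hai " line then
    command_chains.find? (fun chain => PySem.Str.isIn ("hai " ++ chain) line)
  else none

def find_invocations (text : String) (command_chains : List String) : List (String × String) :=
  (iterCodeBlocks text).foldl (fun out block =>
    let block_lines := pySplitNL block
    let invocation_starts : List (Int × String) :=
      (PySem.List.enumerate block_lines 0).foldl
        (fun acc p =>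
          match matchChain command_chains p.2 with
          | some chain => acc ++ [(p.1, chain)]
          | none => acc) []
    if invocation_starts.isEmpty then out
    else
      (PySem.List.enumerate invocation_starts 0).foldl
        (fun out2 q =>
          let e : Int :=
            if q.1 + 1 < (invocation_starts.length : Int) then
              ((PySem.List.pyGet? invocation_starts (q.1 + 1)).getD (0, "")).1
            else (block_lines.length : Int)
          out2 ++ [(q.2.2, PySem.Str.join "\n" (PySem.List.slice block_lines (some q.2.1) (some e)))])
        out) []

-- ===== PORT B =====
def find_invocations_alt (text : String) (command_chains : List String) : List (String × String) :=
  (iterCodeBlocks text).foldl (fun out block =>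
    let st :=
      (pySplitNL block).foldl
        (fun (st : List (String × String) × Option (String × List String)) line =>
          match matchChain command_chains line with
          | some chain =>
            match st.2 with
            | some cur => (st.1 ++ [(cur.1, PySem.Str.join "\n" cur.2)], some (chain, [line]))
            | none => (st.1, some (chain, [line]))
          | none =>
            match st.2 with
            | some cur => (st.1, some (cur.1, cur.2 ++ [line]))
            | none => st)
        (out, none)
    match st.2 with
    | some cur => st.1 ++ [(cur.1, PySem.Str.join "\n" cur.2)]
    | none => st.1) []

-- ===== PRECONDITION & SPEC =====
def Spec_find_invocations (text : String) (command_chains : List String) (out : List (String × String)) : Prop := out = find_invocations_alt text command_chains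
instance (text : String) (command_chains : List String) (out : List (String × String)) : Decidable (Spec_find_invocations text command_chains out) := by unfold Spec_find_invocations; infer_instance

-- ===== CLAIM (what is proved, stated in full; the proofs are below) =====
def Claim_equal_find_invocations : Prop := ∀ (text : String) (command_chains : List String), Dom_find_invocations text command_chains → Spec_find_invocations text command_chains (find_invocations text command_chains)

-- ===== LEMMAS AND PROOFS =====

-- A's invocation-start list, as a structural recursion with an absolute line index
def stFn (m : String → Option String) (i : Nat) : List String → List (Nat × String)
  | [] => []
  | l :: r =>
    match m l with
    | some c => (i, c) :: stFn m (i + 1) r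
    | none => stFn m (i + 1) r

-- A's window list over a given start list (next start, or end of block, bounds each window)
def wFn (bl : List String) : List (Nat × String) → List (String × String)
  | [] => []
  | (s, c) :: rest =>
    (c, PySem.Str.join "\n"
      ((bl.drop s).take ((match rest with | [] => bl.length | (s', _) :: _ => s') - s)))
      :: wFn bl rest

-- B's open-window recursion (proof-side functional form of B's fold)
def goB (m : String → Option String) (c : String) (buf : List String) : List String → List (String × String)
  | [] => [(c, PySem.Str.join "\n" buf)]
  | l :: r =>
    match m l with
    | some c' => (c, PySem.Str.join "\n" buf) :: goB m c' [l] r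
    | none => goB m c (buf ++ [l]) r

def specB (m : String → Option String) : List String → List (String × String)
  | [] => []
  | l :: r =>
    match m l with
    | some c => goB m c [l] r
    | none => specB m r

theorem foldl_starts (m : String → Option String) :
    ∀ (l : List (Int × String)) (a : List (Int × String)),
      l.foldl (fun acc p =>
          match m p.2 with
          | some chain => acc ++ [(p.1, chain)]
          | none => acc) a
        = a ++ l.filterMap (fun p => (m p.2).map (fun c => (p.1, c))) := by
  intro l
  induction l with
  | nil => intro a; simp
  | cons x r ih =>
    intro a
    cases hF : m x.2 with
    | none => simp only [List.foldl_cons, List.filterMap_cons, hF, Option.map_none]; rw [ih]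
    | some y =>
      simp only [List.foldl_cons, List.filterMap_cons, hF, Option.map_some]
      rw [ih]
      simp

theorem foldl_windows (bl : List String) (stI : List (Int × String)) :
    ∀ (l : List (Int × (Int × String))) (a : List (String × String)),
      l.foldl (fun out2 q =>
          let e : Int :=
            if q.1 + 1 < (stI.length : Int) then
              ((PySem.List.pyGet? stI (q.1 + 1)).getD (0, "")).1
            else (bl.length : Int)
          out2 ++ [(q.2.2, PySem.Str.join "\n" (PySem.List.slice bl (some q.2.1) (some e)))]) a
        = a ++ l.map (fun q =>
            (q.2.2, PySem.Str.join "\n" (PySem.List.slice bl (some q.2.1)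
              (some (if q.1 + 1 < (stI.length : Int) then
                       ((PySem.List.pyGet? stI (q.1 + 1)).getD (0, "")).1
                     else (bl.length : Int)))))) := by
  intro l
  induction l with
  | nil => intro a; simp
  | cons x r ih =>
    intro a
    simp only [List.foldl_cons, List.map_cons]
    rw [ih]
    simp

theorem enumerate_filterMap_eq_stFn (m : String → Option String) :
    ∀ (bl : List String) (i : Nat),
      (PySem.List.enumerate bl (i : Int)).filterMap (fun p => (m p.2).map (fun c => (p.1, c)))
        = (stFn m i bl).map (fun p => ((p.1 : Int), p.2)) := by
  intro bl
  induction bl with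
  | nil => intro i; simp [stFn, PySem.List.enumerate]
  | cons l r ih =>
    intro i
    rw [PySem.List.enumerate_cons]
    cases hm : m l with
    | none =>
      simp only [List.filterMap_cons, hm, Option.map_none]
      rw [show ((i : Int) + 1) = ((i + 1 : Nat) : Int) by push_cast; ring, ih]
      simp [stFn, hm]
    | some c =>
      simp only [List.filterMap_cons, hm, Option.map_some]
      rw [show ((i : Int) + 1) = ((i + 1 : Nat) : Int) by push_cast; ring, ih]
      simp [stFn, hm]

theorem length_wFn (bl : List String) : ∀ st : List (Nat × String), (wFn bl st).length = st.length := by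
  intro st
  induction st with
  | nil => simp [wFn]
  | cons p rest ih => cases p; simp [wFn, ih]

theorem getElem_wFn (bl : List String) :
    ∀ (st : List (Nat × String)) (k : Nat) (hk : k < st.length),
      (wFn bl st)[k]'(by rw [length_wFn]; exact hk)
        = ((st[k].2, PySem.Str.join "\n"
            ((bl.drop st[k].1).take
              ((if h2 : k + 1 < st.length then st[k+1].1 else bl.length) - st[k].1)))) := by
  intro st
  induction st with
  | nil => intro k hk; simp at hk
  | cons p rest ih =>
    intro k hk
    cases p with
    | mk s c =>
      cases k with
      | zero =>
        cases rest with
        | nil => simp [wFn]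
        | cons q t =>
          cases q
          simp [wFn]
      | succ k =>
        have hk' : k < rest.length := by simpa using hk
        have := ih k hk'
        simp only [wFn]
        rw [List.getElem_cons_succ, this]
        simp only [List.getElem_cons_succ, List.length_cons]
        congr 1
        congr 2
        by_cases h : k + 1 < rest.length
        · rw [dif_pos h, dif_pos (by omega)]
        · rw [dif_neg h, dif_neg (by omega)]

theorem enum_map_eq_wFn (bl : List String) (st : List (Nat × String)) :
    (PySem.List.enumerate (st.map (fun p => ((p.1 : Int), p.2))) 0).map
      (fun q =>
        (q.2.2, PySem.Str.join "\n" (PySem.List.slice bl (some q.2.1)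
          (some (if q.1 + 1 < ((st.map (fun p => ((p.1 : Int), p.2))).length : Int)
                 then ((PySem.List.pyGet? (st.map (fun p => ((p.1 : Int), p.2))) (q.1 + 1)).getD (0, "")).1
                 else (bl.length : Int))))))
      = wFn bl st := by
  set stI := st.map (fun p => ((p.1 : Int), p.2)) with hstI
  apply List.ext_getElem
  · rw [List.length_map, PySem.List.length_enumerate, length_wFn, hstI, List.length_map]
  · intro k h1 h2
    have hkst : k < st.length := by
      rw [length_wFn] at h2; exact h2
    rw [List.getElem_map, PySem.List.getElem_enumerate]
    rw [getElem_wFn bl st k hkst]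
    simp only [hstI, List.getElem_map, List.length_map, zero_add]
    by_cases h : k + 1 < st.length
    · rw [if_pos (by omega), dif_pos h]
      have hc : ((k : Int) + 1) = ((k + 1 : Nat) : Int) := by push_cast; ring
      rw [hc, PySem.List.pyGet?_natCast,
        List.getElem?_eq_getElem (by simpa using h)]
      simp only [List.getElem_map, Option.getD_some]
      rw [PySem.List.slice_natCast]
    · rw [if_neg (by omega), dif_neg h, PySem.List.slice_natCast]

theorem stFn_succ (m : String → Option String) :
    ∀ (bl : List String) (i : Nat),
      stFn m (i + 1) bl = (stFn m i bl).map (fun p => (p.1 + 1, p.2)) := by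
  intro bl
  induction bl with
  | nil => intro i; simp [stFn]
  | cons l r ih =>
    intro i
    cases hm : m l with
    | none => simp [stFn, hm, ih]
    | some c => simp [stFn, hm, ih]

theorem wFn_shift (l : String) (bl : List String) :
    ∀ st : List (Nat × String),
      wFn (l :: bl) (st.map (fun p => (p.1 + 1, p.2))) = wFn bl st := by
  intro st
  induction st with
  | nil => simp [wFn]
  | cons p rest ih =>
    cases p with
    | mk s c =>
      simp only [List.map_cons, wFn, ih]
      congr 2
      cases rest with
      | nil => simp [List.drop_succ_cons, Nat.succ_sub_succ]
      | cons q t =>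
        cases q
        simp [List.drop_succ_cons, Nat.succ_sub_succ]

theorem goB_eq_wFn (m : String → Option String) :
    ∀ (r : List String) (L : List String) (s : Nat) (buf : List String) (c : String),
      L.drop s = buf ++ r →
      wFn L ((s, c) :: stFn m (s + buf.length) r) = goB m c buf r := by
  intro r
  induction r with
  | nil =>
    intro L s buf c hdrop
    simp only [stFn, wFn, goB]
    congr 2
    rw [hdrop]
    simp only [List.append_nil]
    rw [List.take_of_length_le]
    have := List.length_drop (l := L) (i := s)
    rw [hdrop] at this
    simp at this
    omega
  | cons x r' ih =>
    intro L s buf c hdrop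
    cases hm : m x with
    | none =>
      simp only [stFn, hm, goB]
      have h1 : L.drop s = (buf ++ [x]) ++ r' := by rw [hdrop]; simp
      have h2 := ih L s (buf ++ [x]) c h1
      have harg : s + (buf ++ [x]).length = s + buf.length + 1 := by
        simp [List.length_append]; omega
      rw [harg] at h2
      exact h2
    | some c' =>
      simp only [stFn, hm, goB]
      have hdrop2 : L.drop (s + buf.length) = [x] ++ r' := by
        rw [← List.drop_drop, hdrop]
        simp
      have h2 := ih L (s + buf.length) [x] c' hdrop2
      have harg : s + buf.length + ([x] : List String).length = s + buf.length + 1 := by simp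
      rw [harg] at h2
      rw [← h2]
      conv_lhs => rw [wFn]
      congr 2
      rw [hdrop, Nat.add_sub_cancel_left]
      have : buf ++ x :: r' = buf ++ (x :: r') := rfl
      rw [this, List.take_left' rfl]

theorem wFn_stFn_eq_specB (m : String → Option String) :
    ∀ bl : List String, wFn bl (stFn m 0 bl) = specB m bl := by
  intro bl
  induction bl with
  | nil => simp [stFn, wFn, specB]
  | cons l r ih =>
    cases hm : m l with
    | none =>
      simp only [stFn, hm, specB]
      rw [stFn_succ m r 0, wFn_shift, ih]
    | some c =>
      simp only [stFn, hm, specB]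
      exact goB_eq_wFn m r (l :: r) 0 [l] c (by simp)

-- B's fold = goB / specB
def stepB (m : String → Option String)
    (st : List (String × String) × Option (String × List String)) (line : String) :
    List (String × String) × Option (String × List String) :=
  match m line with
  | some chain =>
    match st.2 with
    | some cur => (st.1 ++ [(cur.1, PySem.Str.join "\n" cur.2)], some (chain, [line]))
    | none => (st.1, some (chain, [line]))
  | none =>
    match st.2 with
    | some cur => (st.1, some (cur.1, cur.2 ++ [line]))
    | none => st

def flushB (st : List (String × String) × Option (String × List String)) : List (String × String) :=
  match st.2 with
  | some cur => st.1 ++ [(cur.1, PySem.Str.join "\n" cur.2)]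
  | none => st.1

theorem bfold_some (m : String → Option String) :
    ∀ (lines : List String) (out : List (String × String)) (c : String) (buf : List String),
      flushB (lines.foldl (stepB m) (out, some (c, buf))) = out ++ goB m c buf lines := by
  intro lines
  induction lines with
  | nil => intro out c buf; simp [flushB, goB]
  | cons l r ih =>
    intro out c buf
    cases hm : m l with
    | none =>
      rw [List.foldl_cons, show stepB m (out, some (c, buf)) l = (out, some (c, buf ++ [l])) by
        simp [stepB, hm]]
      rw [ih]
      simp [goB, hm]
    | some c' =>
      rw [List.foldl_cons, show stepB m (out, some (c, buf)) l
            = (out ++ [(c, PySem.Str.join "\n" buf)], some (c', [l])) by simp [stepB, hm]]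
      rw [ih]
      simp [goB, hm]

theorem bfold_none (m : String → Option String) :
    ∀ (lines : List String) (out : List (String × String)),
      flushB (lines.foldl (stepB m) (out, none)) = out ++ specB m lines := by
  intro lines
  induction lines with
  | nil => intro out; simp [flushB, specB]
  | cons l r ih =>
    intro out
    cases hm : m l with
    | none =>
      rw [List.foldl_cons, show stepB m (out, none) l = (out, none) by simp [stepB, hm]]
      rw [ih]
      simp [specB, hm]
    | some c =>
      rw [List.foldl_cons, show stepB m (out, none) l = (out, some (c, [l])) by simp [stepB, hm]]
      rw [bfold_some]
      simp [specB, hm]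

theorem foldl_ext {α β : Type} (f g : β → α → β) (h : ∀ b a, f b a = g b a) :
    ∀ (l : List α) (b : β), l.foldl f b = l.foldl g b := by
  intro l
  induction l with
  | nil => intro b; rfl
  | cons x r ih => intro b; rw [List.foldl_cons, List.foldl_cons, h, ih]

-- the per-block step of A equals the per-block step of B
theorem block_step_eq (command_chains : List String) (out : List (String × String)) (block : String) :
    (let block_lines := pySplitNL block
     let invocation_starts : List (Int × String) :=
       (PySem.List.enumerate block_lines 0).foldl
         (fun acc p =>
           match matchChain command_chains p.2 with
           | some chain => acc ++ [(p.1, chain)]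
           | none => acc) []
     if invocation_starts.isEmpty then out
     else
       (PySem.List.enumerate invocation_starts 0).foldl
         (fun out2 q =>
           let e : Int :=
             if q.1 + 1 < (invocation_starts.length : Int) then
               ((PySem.List.pyGet? invocation_starts (q.1 + 1)).getD (0, "")).1
             else (block_lines.length : Int)
           out2 ++ [(q.2.2, PySem.Str.join "\n" (PySem.List.slice block_lines (some q.2.1) (some e)))])
         out)
    = out ++ specB (matchChain command_chains) (pySplitNL block) := by
  set m := matchChain command_chains with hm
  set bl := pySplitNL block with hbl
  have hstarts :
      (PySem.List.enumerate bl 0).foldl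
        (fun acc p =>
          match m p.2 with
          | some chain => acc ++ [(p.1, chain)]
          | none => acc) ([] : List (Int × String))
        = (stFn m 0 bl).map (fun p => ((p.1 : Int), p.2)) := by
    rw [foldl_starts m]
    rw [show (0 : Int) = ((0 : Nat) : Int) by simp, enumerate_filterMap_eq_stFn]
    simp
  simp only []
  rw [hstarts]
  by_cases hnil : stFn m 0 bl = []
  · rw [hnil]
    have : specB m bl = [] := by
      rw [← wFn_stFn_eq_specB, hnil, wFn]
    simp [this]
  · have hne : ((stFn m 0 bl).map (fun p => ((p.1 : Int), p.2))).isEmpty = false := by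
      simp [hnil]
    rw [hne]
    simp only [Bool.false_eq_true, if_false]
    rw [foldl_windows bl ((stFn m 0 bl).map (fun p => ((p.1 : Int), p.2)))]
    rw [enum_map_eq_wFn bl (stFn m 0 bl), wFn_stFn_eq_specB]

-- ===== VERDICT (by name: the statement is the Claim_ definition above) =====
theorem find_invocations_spec : Claim_equal_find_invocations := by
  unfold Claim_equal_find_invocations
  intro text command_chains _
  unfold Spec_find_invocations
  unfold find_invocations find_invocations_alt
  apply foldl_ext
  intro out block
  exact (block_step_eq command_chains out block).trans
    (bfold_none (matchChain command_chains) (pySplitNL block) out).symm
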